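-- pv_equiv track=rewrite | github.com/grio43/eve-source | src/_decomp/projectdiscovery/client/util/util.py | calculate_rank_band
-- ===== SOURCE A (Python) =====
-- RANK_BAND_BY_LEVEL = {15: 1,
--  30: 2,
--  60: 3,
--  90: 4,
--  120: 5,
--  180: 6,
--  210: 7,
--  240: 8,
--  300: 9,
--  450: 10,
--  750: 11,
--  1000: 12}
--
-- def calculate_rank_band(rank):
--     current_rank_band = 1
--     for level in sorted(RANK_BAND_BY_LEVEL.keys()):
--         rank_band = RANK_BAND_BY_LEVEL[level]
--         if level > rank:
--             return current_rank_band
--         current_rank_band = rank_band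
--
--     return current_rank_band
-- ===== SOURCE B (Python) =====
-- _THRESHOLDS = [15, 30, 60, 90, 120, 180, 210, 240, 300, 450, 750, 1000]
-- _BANDS = [1, 2, 3, 4, 5, 6, 7, 8, 9, 10, 11, 12]
--
-- def calculate_rank_band(rank):
--     # binary search: index of first threshold strictly greater than rank
--     lo, hi = 0, len(_THRESHOLDS)
--     while lo < hi:
--         mid = (lo + hi) // 2
--         if _THRESHOLDS[mid] <= rank:
--             lo = mid + 1
--         else:
--             hi = mid
--     return _BANDS[lo - 1] if lo > 0 else 1
-- ===== Notes on version B (the rewrite author's own statement) =====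
-- stated objective: alternative
-- what changed: Replaces the linear scan over the sorted dict keys by a hand-written binary search (bisect_right) over a precomputed threshold list with a parallel band list.
import Mathlib
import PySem

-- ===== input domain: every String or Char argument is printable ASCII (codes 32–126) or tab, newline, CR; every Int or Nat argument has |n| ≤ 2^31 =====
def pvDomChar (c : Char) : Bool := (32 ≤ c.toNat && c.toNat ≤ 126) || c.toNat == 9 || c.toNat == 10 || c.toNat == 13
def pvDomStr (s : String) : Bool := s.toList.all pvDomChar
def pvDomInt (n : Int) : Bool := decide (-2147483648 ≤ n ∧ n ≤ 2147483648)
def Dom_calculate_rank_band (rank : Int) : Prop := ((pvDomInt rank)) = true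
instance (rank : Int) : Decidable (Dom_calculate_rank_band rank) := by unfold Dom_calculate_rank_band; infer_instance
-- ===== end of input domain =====

-- B replaces A's linear scan of the sorted dict keys by a binary search over a
-- precomputed threshold list (objective: alternative; not measurably faster on 12 entries).

-- ===== PORT A =====
-- The module-level dict, in insertion order.
def RANK_BAND_BY_LEVEL : PySem.Dict Int Int :=
  PySem.Dict.ofList [(15, 1), (30, 2), (60, 3), (90, 4), (120, 5), (180, 6),
   (210, 7), (240, 8), (300, 9), (450, 10), (750, 11), (1000, 12)]

-- the for-loop with its early return
def scanA (rank : Int) (cur : Int) : List Int → Int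
  | [] => cur
  | level :: rest =>
      let rank_band := PySem.Dict.getD RANK_BAND_BY_LEVEL level 0
      if level > rank then cur else scanA rank rank_band rest

def calculate_rank_band (rank : Int) : Int :=
  scanA rank 1 (PySem.List.sorted (PySem.Dict.keys RANK_BAND_BY_LEVEL) (fun x => x))

-- ===== PORT B =====
def pvTHRESHOLDS : List Int := [15, 30, 60, 90, 120, 180, 210, 240, 300, 450, 750, 1000]
def pvBANDS : List Int := [1, 2, 3, 4, 5, 6, 7, 8, 9, 10, 11, 12]

-- the while loop, with fuel ≥ hi - lo (each step shrinks the interval)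
def bisectLoop (rank : Int) (lo hi : Nat) : Nat → Nat
  | 0 => lo
  | fuel + 1 =>
      if lo < hi then
        let mid := (lo + hi) / 2
        if pvTHRESHOLDS.getD mid 0 ≤ rank then bisectLoop rank (mid + 1) hi fuel
        else bisectLoop rank lo mid fuel
      else lo

def calculate_rank_band_alt (rank : Int) : Int :=
  let lo := bisectLoop rank 0 pvTHRESHOLDS.length pvTHRESHOLDS.length
  if lo > 0 then pvBANDS.getD (lo - 1) 1 else 1

-- ===== PRECONDITION & SPEC =====
def Spec_calculate_rank_band (rank : Int) (out : Int) : Prop := out = calculate_rank_band_alt rank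
instance (rank : Int) (out : Int) : Decidable (Spec_calculate_rank_band rank out) := by unfold Spec_calculate_rank_band; infer_instance

-- ===== CLAIM (what is proved, stated in full; the proofs are below) =====
def Claim_equal_calculate_rank_band : Prop := ∀ (rank : Int), Dom_calculate_rank_band rank → Spec_calculate_rank_band rank (calculate_rank_band rank)

-- ===== LEMMAS AND PROOFS =====

theorem sortedKeys_eq :
    PySem.List.sorted (PySem.Dict.keys RANK_BAND_BY_LEVEL) (fun x => x) false
      = [15, 30, 60, 90, 120, 180, 210, 240, 300, 450, 750, 1000] := by
  decide

-- full unfolding of the binary search on the fixed 12-element list (whnf-checked)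
theorem bisectLoop_expand (rank : Int) : bisectLoop rank 0 12 12 =
  (if (210:Int) ≤ rank then (if (450:Int) ≤ rank then (if (1000:Int) ≤ rank then 12 else (if (750:Int) ≤ rank then 11 else 10)) else (if (300:Int) ≤ rank then 9 else (if (240:Int) ≤ rank then 8 else 7))) else (if (90:Int) ≤ rank then (if (180:Int) ≤ rank then 6 else (if (120:Int) ≤ rank then 5 else 4)) else (if (30:Int) ≤ rank then (if (60:Int) ≤ rank then 3 else 2) else (if (15:Int) ≤ rank then 1 else 0)))) := by
  rfl

-- ===== VERDICT (by name: the statement is the Claim_ definition above) =====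
set_option maxHeartbeats 1000000 in
theorem calculate_rank_band_spec : Claim_equal_calculate_rank_band := by
  intro rank _
  unfold Spec_calculate_rank_band calculate_rank_band calculate_rank_band_alt
  rw [sortedKeys_eq]
  simp only [pvTHRESHOLDS, List.length_cons, List.length_nil]
  rw [show (0:Nat)+1+1+1+1+1+1+1+1+1+1+1+1 = 12 from rfl, bisectLoop_expand]
  simp only [scanA, show PySem.Dict.getD RANK_BAND_BY_LEVEL 15 0 = 1 from by decide, show PySem.Dict.getD RANK_BAND_BY_LEVEL 30 0 = 2 from by decide, show PySem.Dict.getD RANK_BAND_BY_LEVEL 60 0 = 3 from by decide, show PySem.Dict.getD RANK_BAND_BY_LEVEL 90 0 = 4 from by decide, show PySem.Dict.getD RANK_BAND_BY_LEVEL 120 0 = 5 from by decide, show PySem.Dict.getD RANK_BAND_BY_LEVEL 180 0 = 6 from by decide, show PySem.Dict.getD RANK_BAND_BY_LEVEL 210 0 = 7 from by decide, show PySem.Dict.getD RANK_BAND_BY_LEVEL 240 0 = 8 from by decide, show PySem.Dict.getD RANK_BAND_BY_LEVEL 300 0 = 9 from by decide, show PySem.Dict.getD RANK_BAND_BY_LEVEL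 450 0 = 10 from by decide, show PySem.Dict.getD RANK_BAND_BY_LEVEL 750 0 = 11 from by decide, show PySem.Dict.getD RANK_BAND_BY_LEVEL 1000 0 = 12 from by decide]
  by_cases hc0 : rank < 15
  · -- interval 0
    rw [if_pos (show ((15:Int)) > rank by omega)]
    rw [if_neg (show ¬(((210:Int)) ≤ rank) by omega)]
    rw [if_neg (show ¬(((90:Int)) ≤ rank) by omega)]
    rw [if_neg (show ¬(((30:Int)) ≤ rank) by omega)]
    rw [if_neg (show ¬(((15:Int)) ≤ rank) by omega)]
    norm_num [pvBANDS]
  by_cases hc1 : rank < 30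
  · -- interval 1
    rw [if_neg (show ¬(((15:Int)) > rank) by omega)]
    rw [if_pos (show ((30:Int)) > rank by omega)]
    rw [if_neg (show ¬(((210:Int)) ≤ rank) by omega)]
    rw [if_neg (show ¬(((90:Int)) ≤ rank) by omega)]
    rw [if_neg (show ¬(((30:Int)) ≤ rank) by omega)]
    rw [if_pos (show ((15:Int)) ≤ rank by omega)]
    norm_num [pvBANDS]
  by_cases hc2 : rank < 60
  · -- interval 2
    rw [if_neg (show ¬(((15:Int)) > rank) by omega)]
    rw [if_neg (show ¬(((30:Int)) > rank) by omega)]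
    rw [if_pos (show ((60:Int)) > rank by omega)]
    rw [if_neg (show ¬(((210:Int)) ≤ rank) by omega)]
    rw [if_neg (show ¬(((90:Int)) ≤ rank) by omega)]
    rw [if_pos (show ((30:Int)) ≤ rank by omega)]
    rw [if_neg (show ¬(((60:Int)) ≤ rank) by omega)]
    norm_num [pvBANDS]
  by_cases hc3 : rank < 90
  · -- interval 3
    rw [if_neg (show ¬(((15:Int)) > rank) by omega)]
    rw [if_neg (show ¬(((30:Int)) > rank) by omega)]
    rw [if_neg (show ¬(((60:Int)) > rank) by omega)]
    rw [if_pos (show ((90:Int)) > rank by omega)]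
    rw [if_neg (show ¬(((210:Int)) ≤ rank) by omega)]
    rw [if_neg (show ¬(((90:Int)) ≤ rank) by omega)]
    rw [if_pos (show ((30:Int)) ≤ rank by omega)]
    rw [if_pos (show ((60:Int)) ≤ rank by omega)]
    norm_num [pvBANDS]
  by_cases hc4 : rank < 120
  · -- interval 4
    rw [if_neg (show ¬(((15:Int)) > rank) by omega)]
    rw [if_neg (show ¬(((30:Int)) > rank) by omega)]
    rw [if_neg (show ¬(((60:Int)) > rank) by omega)]
    rw [if_neg (show ¬(((90:Int)) > rank) by omega)]
    rw [if_pos (show ((120:Int)) > rank by omega)]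
    rw [if_neg (show ¬(((210:Int)) ≤ rank) by omega)]
    rw [if_pos (show ((90:Int)) ≤ rank by omega)]
    rw [if_neg (show ¬(((180:Int)) ≤ rank) by omega)]
    rw [if_neg (show ¬(((120:Int)) ≤ rank) by omega)]
    norm_num [pvBANDS]
  by_cases hc5 : rank < 180
  · -- interval 5
    rw [if_neg (show ¬(((15:Int)) > rank) by omega)]
    rw [if_neg (show ¬(((30:Int)) > rank) by omega)]
    rw [if_neg (show ¬(((60:Int)) > rank) by omega)]
    rw [if_neg (show ¬(((90:Int)) > rank) by omega)]
    rw [if_neg (show ¬(((120:Int)) > rank) by omega)]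
    rw [if_pos (show ((180:Int)) > rank by omega)]
    rw [if_neg (show ¬(((210:Int)) ≤ rank) by omega)]
    rw [if_pos (show ((90:Int)) ≤ rank by omega)]
    rw [if_neg (show ¬(((180:Int)) ≤ rank) by omega)]
    rw [if_pos (show ((120:Int)) ≤ rank by omega)]
    norm_num [pvBANDS]
  by_cases hc6 : rank < 210
  · -- interval 6
    rw [if_neg (show ¬(((15:Int)) > rank) by omega)]
    rw [if_neg (show ¬(((30:Int)) > rank) by omega)]
    rw [if_neg (show ¬(((60:Int)) > rank) by omega)]
    rw [if_neg (show ¬(((90:Int)) > rank) by omega)]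
    rw [if_neg (show ¬(((120:Int)) > rank) by omega)]
    rw [if_neg (show ¬(((180:Int)) > rank) by omega)]
    rw [if_pos (show ((210:Int)) > rank by omega)]
    rw [if_neg (show ¬(((210:Int)) ≤ rank) by omega)]
    rw [if_pos (show ((90:Int)) ≤ rank by omega)]
    rw [if_pos (show ((180:Int)) ≤ rank by omega)]
    norm_num [pvBANDS]
  by_cases hc7 : rank < 240
  · -- interval 7
    rw [if_neg (show ¬(((15:Int)) > rank) by omega)]
    rw [if_neg (show ¬(((30:Int)) > rank) by omega)]
    rw [if_neg (show ¬(((60:Int)) > rank) by omega)]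
    rw [if_neg (show ¬(((90:Int)) > rank) by omega)]
    rw [if_neg (show ¬(((120:Int)) > rank) by omega)]
    rw [if_neg (show ¬(((180:Int)) > rank) by omega)]
    rw [if_neg (show ¬(((210:Int)) > rank) by omega)]
    rw [if_pos (show ((240:Int)) > rank by omega)]
    rw [if_pos (show ((210:Int)) ≤ rank by omega)]
    rw [if_neg (show ¬(((450:Int)) ≤ rank) by omega)]
    rw [if_neg (show ¬(((300:Int)) ≤ rank) by omega)]
    rw [if_neg (show ¬(((240:Int)) ≤ rank) by omega)]
    norm_num [pvBANDS]
  by_cases hc8 : rank < 300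
  · -- interval 8
    rw [if_neg (show ¬(((15:Int)) > rank) by omega)]
    rw [if_neg (show ¬(((30:Int)) > rank) by omega)]
    rw [if_neg (show ¬(((60:Int)) > rank) by omega)]
    rw [if_neg (show ¬(((90:Int)) > rank) by omega)]
    rw [if_neg (show ¬(((120:Int)) > rank) by omega)]
    rw [if_neg (show ¬(((180:Int)) > rank) by omega)]
    rw [if_neg (show ¬(((210:Int)) > rank) by omega)]
    rw [if_neg (show ¬(((240:Int)) > rank) by omega)]
    rw [if_pos (show ((300:Int)) > rank by omega)]
    rw [if_pos (show ((210:Int)) ≤ rank by omega)]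
    rw [if_neg (show ¬(((450:Int)) ≤ rank) by omega)]
    rw [if_neg (show ¬(((300:Int)) ≤ rank) by omega)]
    rw [if_pos (show ((240:Int)) ≤ rank by omega)]
    norm_num [pvBANDS]
  by_cases hc9 : rank < 450
  · -- interval 9
    rw [if_neg (show ¬(((15:Int)) > rank) by omega)]
    rw [if_neg (show ¬(((30:Int)) > rank) by omega)]
    rw [if_neg (show ¬(((60:Int)) > rank) by omega)]
    rw [if_neg (show ¬(((90:Int)) > rank) by omega)]
    rw [if_neg (show ¬(((120:Int)) > rank) by omega)]
    rw [if_neg (show ¬(((180:Int)) > rank) by omega)]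
    rw [if_neg (show ¬(((210:Int)) > rank) by omega)]
    rw [if_neg (show ¬(((240:Int)) > rank) by omega)]
    rw [if_neg (show ¬(((300:Int)) > rank) by omega)]
    rw [if_pos (show ((450:Int)) > rank by omega)]
    rw [if_pos (show ((210:Int)) ≤ rank by omega)]
    rw [if_neg (show ¬(((450:Int)) ≤ rank) by omega)]
    rw [if_pos (show ((300:Int)) ≤ rank by omega)]
    norm_num [pvBANDS]
  by_cases hc10 : rank < 750
  · -- interval 10
    rw [if_neg (show ¬(((15:Int)) > rank) by omega)]
    rw [if_neg (show ¬(((30:Int)) > rank) by omega)]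
    rw [if_neg (show ¬(((60:Int)) > rank) by omega)]
    rw [if_neg (show ¬(((90:Int)) > rank) by omega)]
    rw [if_neg (show ¬(((120:Int)) > rank) by omega)]
    rw [if_neg (show ¬(((180:Int)) > rank) by omega)]
    rw [if_neg (show ¬(((210:Int)) > rank) by omega)]
    rw [if_neg (show ¬(((240:Int)) > rank) by omega)]
    rw [if_neg (show ¬(((300:Int)) > rank) by omega)]
    rw [if_neg (show ¬(((450:Int)) > rank) by omega)]
    rw [if_pos (show ((750:Int)) > rank by omega)]
    rw [if_pos (show ((210:Int)) ≤ rank by omega)]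
    rw [if_pos (show ((450:Int)) ≤ rank by omega)]
    rw [if_neg (show ¬(((1000:Int)) ≤ rank) by omega)]
    rw [if_neg (show ¬(((750:Int)) ≤ rank) by omega)]
    norm_num [pvBANDS]
  by_cases hc11 : rank < 1000
  · -- interval 11
    rw [if_neg (show ¬(((15:Int)) > rank) by omega)]
    rw [if_neg (show ¬(((30:Int)) > rank) by omega)]
    rw [if_neg (show ¬(((60:Int)) > rank) by omega)]
    rw [if_neg (show ¬(((90:Int)) > rank) by omega)]
    rw [if_neg (show ¬(((120:Int)) > rank) by omega)]
    rw [if_neg (show ¬(((180:Int)) > rank) by omega)]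
    rw [if_neg (show ¬(((210:Int)) > rank) by omega)]
    rw [if_neg (show ¬(((240:Int)) > rank) by omega)]
    rw [if_neg (show ¬(((300:Int)) > rank) by omega)]
    rw [if_neg (show ¬(((450:Int)) > rank) by omega)]
    rw [if_neg (show ¬(((750:Int)) > rank) by omega)]
    rw [if_pos (show ((1000:Int)) > rank by omega)]
    rw [if_pos (show ((210:Int)) ≤ rank by omega)]
    rw [if_pos (show ((450:Int)) ≤ rank by omega)]
    rw [if_neg (show ¬(((1000:Int)) ≤ rank) by omega)]
    rw [if_pos (show ((750:Int)) ≤ rank by omega)]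
    norm_num [pvBANDS]
  -- interval 12 (rank ≥ 1000)
  rw [if_neg (show ¬(((15:Int)) > rank) by omega)]
  rw [if_neg (show ¬(((30:Int)) > rank) by omega)]
  rw [if_neg (show ¬(((60:Int)) > rank) by omega)]
  rw [if_neg (show ¬(((90:Int)) > rank) by omega)]
  rw [if_neg (show ¬(((120:Int)) > rank) by omega)]
  rw [if_neg (show ¬(((180:Int)) > rank) by omega)]
  rw [if_neg (show ¬(((210:Int)) > rank) by omega)]
  rw [if_neg (show ¬(((240:Int)) > rank) by omega)]
  rw [if_neg (show ¬(((300:Int)) > rank) by omega)]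
  rw [if_neg (show ¬(((450:Int)) > rank) by omega)]
  rw [if_neg (show ¬(((750:Int)) > rank) by omega)]
  rw [if_neg (show ¬(((1000:Int)) > rank) by omega)]
  rw [if_pos (show ((210:Int)) ≤ rank by omega)]
  rw [if_pos (show ((450:Int)) ≤ rank by omega)]
  rw [if_pos (show ((1000:Int)) ≤ rank by omega)]
  norm_num [pvBANDS]
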